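-- pv_equiv track=rewrite | github.com/eunsolkang/review-analysis-web-report | server/api/pyCode/wordCloudMaker.py | divideStrings
-- ===== SOURCE A (Python) =====
-- def divideStrings(strings):
--     keyStrs = ""
--     proStrs = ""
--     conStrs = ""
--     for string in strings:
--         st = string["sentence"].lower()
--         keyStrs += str(st)
--         if(string["sentiment"] == '1'):
--             proStrs += st
--         elif(string["sentiment"] == '2'):
--             conStrs += st
--     return proStrs,conStrs,keyStrs
-- ===== SOURCE B (Python) =====
-- def divideStrings(strings):
--     # Divide and conquer: recursively split the list in half, combine the
--     # (pro, con, key) triples by componentwise concatenation (associative).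
--     def go(lo, hi):
--         if hi == lo:
--             return ("", "", "")
--         if hi - lo == 1:
--             d = strings[lo]
--             st = d["sentence"].lower()
--             senti = d["sentiment"]
--             pro = st if senti == '1' else ""
--             con = st if senti == '2' else ""
--             return (pro, con, st)
--         mid = (lo + hi) // 2
--         lp, lc, lk = go(lo, mid)
--         rp, rc, rk = go(mid, hi)
--         return (lp + rp, lc + rc, lk + rk)
--     return go(0, len(strings))
-- ===== Notes on version B (the rewrite author's own statement) =====
-- stated objective: alternative
-- what changed: Replaces A's single left-to-right accumulator loop with a divide-and-conquer recursion that splits the index range in half and merges (pro, con, key) triples by componentwise concatenation, correct because string concatenation is associative.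
import Mathlib
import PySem

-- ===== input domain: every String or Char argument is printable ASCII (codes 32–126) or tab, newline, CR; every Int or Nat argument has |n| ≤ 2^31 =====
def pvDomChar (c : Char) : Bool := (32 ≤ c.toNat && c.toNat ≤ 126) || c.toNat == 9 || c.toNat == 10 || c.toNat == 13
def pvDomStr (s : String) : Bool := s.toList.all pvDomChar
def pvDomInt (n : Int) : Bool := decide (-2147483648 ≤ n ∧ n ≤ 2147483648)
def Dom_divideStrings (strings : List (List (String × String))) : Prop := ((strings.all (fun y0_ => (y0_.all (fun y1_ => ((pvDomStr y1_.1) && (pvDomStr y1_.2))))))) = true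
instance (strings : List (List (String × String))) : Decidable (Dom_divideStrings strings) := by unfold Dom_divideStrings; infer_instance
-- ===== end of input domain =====

-- B replaces A's single left-to-right accumulator loop by a divide-and-conquer recursion over index ranges, merging triples by concatenation (alternative decomposition; same result).


-- ===== PORT A =====
-- dict[str,str] is an association list; lookup = first match (Python dict access)
def pvLookup (d : List (String × String)) (k : String) : Option String :=
  (PySem.Dict.mk d).get? k

-- literal port of A's loop: one pass, three string accumulators (key, pro, con);
-- a missing "sentence"/"sentiment" key is a KeyError in Python (excluded by Pre_): the port skips the entry there
def pvStepA (acc : List Char × List Char × List Char) (string : List (String × String)) :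
    List Char × List Char × List Char :=
  match pvLookup string "sentence", pvLookup string "sentiment" with
  | some sent, some senti =>
    let st := PySem.Chars.lower sent.toList
    if senti == "1" then (acc.1 ++ st, acc.2.1 ++ st, acc.2.2)
    else if senti == "2" then (acc.1 ++ st, acc.2.1, acc.2.2 ++ st)
    else (acc.1 ++ st, acc.2.1, acc.2.2)
  | _, _ => acc

def divideStrings (strings : List (List (String × String))) : String × String × String :=
  let r := strings.foldl pvStepA ([], [], [])
  (String.ofList r.2.1, String.ofList r.2.2, String.ofList r.1)

-- ===== PORT B =====
-- port of Source B's go(lo, hi): divide-and-conquer over the index range [lo, hi);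
-- a missing "sentence"/"sentiment" key is a KeyError in Python (outside Pre_): the port yields ([],[],[]) there
-- the 'hi == lo' base case is guarded as 'hi ≤ lo' so termination holds for all Nat
-- arguments; every call B actually makes has lo ≤ hi, where the two tests coincide
def pvGoB (strings : List (List (String × String))) (lo hi : Nat) :
    List Char × List Char × List Char :=
  if _h0 : hi ≤ lo then ([], [], [])
  else if _h1 : hi - lo = 1 then
    let d := strings.getD lo []
    match pvLookup d "sentence", pvLookup d "sentiment" with
    | some s, some senti =>
      let st := PySem.Chars.lower s.toList
      (if senti == "1" then st else [], if senti == "2" then st else [], st)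
    | _, _ => ([], [], [])
  else
    let mid := (lo + hi) / 2
    let l := pvGoB strings lo mid
    let r := pvGoB strings mid hi
    (l.1 ++ r.1, l.2.1 ++ r.2.1, l.2.2 ++ r.2.2)
termination_by hi - lo
decreasing_by all_goals omega

def divideStrings_alt (strings : List (List (String × String))) : String × String × String :=
  let r := pvGoB strings 0 strings.length
  (String.ofList r.1, String.ofList r.2.1, String.ofList r.2.2)

-- ===== PRECONDITION & SPEC =====
-- Pre_ excludes exactly the dicts lacking a "sentence" or "sentiment" key, on which Python A raises KeyError
def Pre_divideStrings (strings : List (List (String × String))) : Prop :=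
  ∀ d ∈ strings, (pvLookup d "sentence").isSome = true ∧ (pvLookup d "sentiment").isSome = true
instance (strings : List (List (String × String))) : Decidable (Pre_divideStrings strings) := by unfold Pre_divideStrings; infer_instance

def pvWitness_divideStrings : (List (List (String × String))) :=
  [[("sentence", "Hi "), ("sentiment", "1")], [("sentence", "BAD"), ("sentiment", "2")]]

def Spec_divideStrings (strings : List (List (String × String))) (out : String × String × String) : Prop := out = divideStrings_alt strings
instance (strings : List (List (String × String))) (out : String × String × String) : Decidable (Spec_divideStrings strings out) := by unfold Spec_divideStrings; infer_instance

-- ===== CLAIM (what is proved, stated in full; the proofs are below) =====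
def Claim_equal_divideStrings : Prop := ∀ (strings : List (List (String × String))), Dom_divideStrings strings → Pre_divideStrings strings → Spec_divideStrings strings (divideStrings strings)

-- ===== LEMMAS AND PROOFS =====
-- s["sentence"].lower() as a char list; [] only on a missing key (outside Pre_)
def pvSentLower (d : List (String × String)) : List Char :=
  match pvLookup d "sentence" with
  | some s => PySem.Chars.lower s.toList
  | none => []

-- the (pro, con, key) triple of a list segment, as one spec both ports are reduced to
def pvTriple (l : List (List (String × String))) : List Char × List Char × List Char :=
  (((l.filter (fun d => pvLookup d "sentiment" == some "1")).map pvSentLower).flatten,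
   ((l.filter (fun d => pvLookup d "sentiment" == some "2")).map pvSentLower).flatten,
   (l.map pvSentLower).flatten)

lemma pvTriple_append (a b : List (List (String × String))) :
    pvTriple (a ++ b) =
      ((pvTriple a).1 ++ (pvTriple b).1, (pvTriple a).2.1 ++ (pvTriple b).2.1,
       (pvTriple a).2.2 ++ (pvTriple b).2.2) := by
  simp [pvTriple]

lemma pvLoop_eq (strings : List (List (String × String)))
    (h : Pre_divideStrings strings) (k p c : List Char) :
    strings.foldl pvStepA (k, p, c) =
      (k ++ (pvTriple strings).2.2, p ++ (pvTriple strings).1, c ++ (pvTriple strings).2.1) := by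
  induction strings generalizing k p c with
  | nil => simp [pvTriple]
  | cons d rest ih =>
    have hd := h d (List.mem_cons_self ..)
    obtain ⟨s, hs⟩ := Option.isSome_iff_exists.mp hd.1
    obtain ⟨t, ht⟩ := Option.isSome_iff_exists.mp hd.2
    have hrest : Pre_divideStrings rest := fun x hx => h x (List.mem_cons_of_mem _ hx)
    simp only [List.foldl_cons, pvStepA, hs, ht]
    by_cases h1 : t = "1"
    · simp [h1, ht, ih hrest, pvSentLower, hs, pvTriple]
    · by_cases h2 : t = "2"
      · simp [h2, ht, ih hrest, pvSentLower, hs, pvTriple]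
      · simp [h1, h2, ht, ih hrest, pvSentLower, hs, pvTriple]

lemma pvGo_eq (strings : List (List (String × String))) (h : Pre_divideStrings strings)
    (lo hi : Nat) (hle : lo ≤ hi) (hhi : hi ≤ strings.length) :
    pvGoB strings lo hi = pvTriple ((strings.drop lo).take (hi - lo)) := by
  generalize hn : hi - lo = n
  induction n using Nat.strong_induction_on generalizing lo hi with
  | _ n ih =>
    rw [pvGoB]
    by_cases h0 : hi ≤ lo
    · have : hi = lo := by omega
      subst this
      simp at hn
      simp [← hn, pvTriple]
    · rw [dif_neg h0]
      by_cases h1 : hi - lo = 1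
      · rw [dif_pos h1]
        have hlt : lo < strings.length := by omega
        have hdrop : strings.drop lo = strings[lo] :: strings.drop (lo + 1) :=
          List.drop_eq_getElem_cons hlt
        have hmem : strings[lo] ∈ strings := List.getElem_mem hlt
        have hd := h _ hmem
        obtain ⟨s, hs⟩ := Option.isSome_iff_exists.mp hd.1
        obtain ⟨t, ht⟩ := Option.isSome_iff_exists.mp hd.2
        have hgd : strings.getD lo [] = strings[lo] := List.getD_eq_getElem _ _ hlt
        have htake : (strings.drop lo).take 1 = [strings[lo]] := by rw [hdrop]; rfl
        rw [← hn, h1, htake]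
        simp only [hgd, hs, ht]
        by_cases ht1 : t = "1"
        · simp [ht1, pvTriple, pvSentLower, hs, ht]
        · by_cases ht2 : t = "2"
          · simp [ht2, pvTriple, pvSentLower, hs, ht]
          · simp [ht1, ht2, pvTriple, pvSentLower, hs, ht]
      · rw [dif_neg h1]
        have h2 : 2 ≤ hi - lo := by omega
        have hm1 : lo < (lo + hi) / 2 := by omega
        have hm2 : (lo + hi) / 2 < hi := by omega
        simp only [ih ((lo + hi) / 2 - lo) (by omega) lo ((lo + hi) / 2) (by omega) (by omega) rfl,
            ih (hi - (lo + hi) / 2) (by omega) ((lo + hi) / 2) hi (by omega) hhi rfl]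
        have e1 : ((lo + hi) / 2 - lo) + (hi - (lo + hi) / 2) = hi - lo := by omega
        have e2 : lo + ((lo + hi) / 2 - lo) = (lo + hi) / 2 := by omega
        have hsplit : (strings.drop lo).take (hi - lo) =
            (strings.drop lo).take ((lo + hi) / 2 - lo) ++
            (strings.drop ((lo + hi) / 2)).take (hi - (lo + hi) / 2) := by
          rw [← e1, List.take_add, List.drop_drop, e2]
        rw [← hn, hsplit, pvTriple_append]

-- ===== VERDICT (by name: the statement is the Claim_ definition above) =====
theorem divideStrings_spec : Claim_equal_divideStrings := by
  intro strings _ hpre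
  unfold Spec_divideStrings divideStrings divideStrings_alt
  rw [pvGo_eq strings hpre 0 strings.length (Nat.zero_le _) le_rfl]
  simp [pvLoop_eq strings hpre [] [] []]
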